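-- pv_equiv track=rewrite | github.com/alfredsimkin/copia_regulates_plasticity | chimeric_copia_reads/input_files/scripts/map_to_seeds.py | place_reads
-- ===== SOURCE A (Python) =====
-- def place_reads(matching_reads, parsed_seeds):
-- 	seed_reads, non_seed_reads=[],[]
-- 	for read_name in matching_reads:
-- 		score, read_chrom, read_start, read_end=matching_reads[read_name]
-- 		in_seed=False
-- 		for seed_chrom, seed_start, seed_end in parsed_seeds:
-- 			if read_chrom==seed_chrom and seed_start<read_start and seed_end>read_end:
-- 				in_seed=True
-- 				break
-- 		if in_seed:
-- 			seed_reads.append(read_name)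
-- 		else:
-- 			non_seed_reads.append(read_name)
-- 	return seed_reads, non_seed_reads
-- ===== SOURCE B (Python) =====
-- def place_reads(matching_reads, parsed_seeds):
-- 	# Index the seeds by chromosome once, so each read only scans its own
-- 	# chromosome's bucket; per read compute the max seed end among seeds
-- 	# starting strictly before the read (the read lies in a seed iff that
-- 	# max strictly exceeds the read's end).
-- 	by_chrom = {}
-- 	for seed_chrom, seed_start, seed_end in parsed_seeds:
-- 		by_chrom.setdefault(seed_chrom, []).append((seed_start, seed_end))
-- 	seed_reads, non_seed_reads = [], []
-- 	for read_name, (score, read_chrom, read_start, read_end) in matching_reads.items():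
-- 		best = None
-- 		for seed_start, seed_end in by_chrom.get(read_chrom, ()):
-- 			if seed_start < read_start and (best is None or seed_end > best):
-- 				best = seed_end
-- 		if best is not None and best > read_end:
-- 			seed_reads.append(read_name)
-- 		else:
-- 			non_seed_reads.append(read_name)
-- 	return seed_reads, non_seed_reads
-- ===== Notes on version B (the rewrite author's own statement) =====
-- stated objective: faster
-- what changed: B builds a per-chromosome dict of (start,end) seed intervals once, so the per-read inner scan over ALL seeds (with chromosome test and early break) disappears; per read it folds a running maximum of seed ends over only its chromosome's bucket and compares that max to the read end.
import Mathlib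
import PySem

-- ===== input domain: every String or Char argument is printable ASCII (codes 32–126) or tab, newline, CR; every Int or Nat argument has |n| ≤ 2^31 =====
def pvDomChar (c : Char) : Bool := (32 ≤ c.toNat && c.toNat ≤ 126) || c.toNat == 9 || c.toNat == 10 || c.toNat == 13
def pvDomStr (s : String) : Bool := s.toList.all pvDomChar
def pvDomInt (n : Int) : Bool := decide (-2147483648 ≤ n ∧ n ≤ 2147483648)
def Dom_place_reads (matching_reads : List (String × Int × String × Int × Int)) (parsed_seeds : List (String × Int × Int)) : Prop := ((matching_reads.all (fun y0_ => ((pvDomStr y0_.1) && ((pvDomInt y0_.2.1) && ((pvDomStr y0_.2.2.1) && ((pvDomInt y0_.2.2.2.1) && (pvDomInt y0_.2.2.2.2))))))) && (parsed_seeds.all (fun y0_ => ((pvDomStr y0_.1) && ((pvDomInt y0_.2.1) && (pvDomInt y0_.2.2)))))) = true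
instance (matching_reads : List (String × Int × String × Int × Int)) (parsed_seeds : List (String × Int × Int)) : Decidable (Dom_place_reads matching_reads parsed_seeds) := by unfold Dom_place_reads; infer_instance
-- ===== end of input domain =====

-- ===== PORT A =====
-- B indexes the seeds by chromosome once; equivalence is proved for all inputs.
-- (Python's `matching_reads` is a dict; `for read_name in matching_reads` followed by
-- `matching_reads[read_name]` is ported as iteration over the association list's
-- entries, which is exact for dict inputs, whose keys are unique.)

-- A's inner `for` loop over all seeds with a `break`: first seed on the read's
-- chromosome that strictly contains the read sets the flag.
def prInSeed (read_chrom : String) (read_start read_end : Int) : List (String × Int × Int) → Bool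
  | [] => false
  | (sc, ss, se) :: rest =>
      if sc == read_chrom && decide (ss < read_start) && decide (se > read_end) then true
      else prInSeed read_chrom read_start read_end rest

def place_reads (matching_reads : List (String × Int × String × Int × Int)) (parsed_seeds : List (String × Int × Int)) : List String × List String :=
  matching_reads.foldl
    (fun acc r =>
      if prInSeed r.2.2.1 r.2.2.2.1 r.2.2.2.2 parsed_seeds then
        (acc.1 ++ [r.1], acc.2)
      else
        (acc.1, acc.2 ++ [r.1]))
    ([], [])

-- ===== PORT B =====
-- B's inner loop: running maximum seed end among the chromosome's seeds that start
-- strictly before the read (None ~ no such seed yet).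
def prBest (read_start : Int) (best : Option Int) : List (Int × Int) → Option Int
  | [] => best
  | (ss, se) :: rest =>
      prBest read_start
        (if decide (ss < read_start) &&
            (match best with | none => true | some b => decide (se > b)) then some se else best)
        rest

def place_reads_alt (matching_reads : List (String × Int × String × Int × Int)) (parsed_seeds : List (String × Int × Int)) : List String × List String :=
  let byChrom : PySem.Dict String (List (Int × Int)) :=
    parsed_seeds.foldl (fun d p => d.modify p.1 [] (· ++ [p.2])) PySem.Dict.empty
  matching_reads.foldl
    (fun acc r =>
      match prBest r.2.2.2.1 none (byChrom.getD r.2.2.1 []) with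
      | some b => if decide (b > r.2.2.2.2) then (acc.1 ++ [r.1], acc.2) else (acc.1, acc.2 ++ [r.1])
      | none => (acc.1, acc.2 ++ [r.1]))
    ([], [])

-- ===== PRECONDITION & SPEC =====
def Spec_place_reads (matching_reads : List (String × Int × String × Int × Int)) (parsed_seeds : List (String × Int × Int)) (out : List String × List String) : Prop := out = place_reads_alt matching_reads parsed_seeds
instance (matching_reads : List (String × Int × String × Int × Int)) (parsed_seeds : List (String × Int × Int)) (out : List String × List String) : Decidable (Spec_place_reads matching_reads parsed_seeds out) := by unfold Spec_place_reads; infer_instance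

-- ===== CLAIM (what is proved, stated in full; the proofs are below) =====
def Claim_equal_place_reads : Prop := ∀ (matching_reads : List (String × Int × String × Int × Int)) (parsed_seeds : List (String × Int × Int)), Dom_place_reads matching_reads parsed_seeds → Spec_place_reads matching_reads parsed_seeds (place_reads matching_reads parsed_seeds)

-- ===== LEMMAS AND PROOFS =====

-- A's break-scan is an existence test over the seed list.
theorem prInSeed_eq_any (c : String) (rs re : Int) (seeds : List (String × Int × Int)) :
    prInSeed c rs re seeds
      = seeds.any (fun p => p.1 == c && decide (p.2.1 < rs) && decide (p.2.2 > re)) := by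
  induction seeds with
  | nil => simp [prInSeed]
  | cons h t ih =>
    obtain ⟨sc, ss, se⟩ := h
    by_cases hc : (sc == c && decide (ss < rs) && decide (se > re)) = true
    · simp [prInSeed, hc]
    · simp only [prInSeed, if_neg hc, List.any_cons, ih]
      simp [hc]

def prCheck (re : Int) : Option Int → Bool
  | none => false
  | some b => decide (b > re)

-- B's running-max check is the same existence test over the bucket.
theorem prBest_check (rs re : Int) (l : List (Int × Int)) :
    ∀ best : Option Int,
      prCheck re (prBest rs best l)
        = (prCheck re best || l.any (fun p => decide (p.1 < rs) && decide (p.2 > re))) := by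
  induction l with
  | nil => intro best; simp [prBest]
  | cons h t ih =>
    intro best
    obtain ⟨ss, se⟩ := h
    simp only [prBest, ih, List.any_cons]
    rcases best with _ | b
    · by_cases hs : ss < rs
      · by_cases he : se > re <;> simp [prCheck, hs, he]
      · simp [prCheck, hs]
    · by_cases hs : ss < rs
      · by_cases hb : se > b
        · simp only [hs, hb, decide_true, Bool.true_and, Bool.and_true, if_true]
          simp only [prCheck]
          by_cases he : se > re
          · simp [he]
          · simp [he]
            omega
        · simp only [hs, hb, decide_true, decide_false, Bool.true_and, Bool.and_false]
          simp only [prCheck]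
          by_cases he : se > re
          · simp [he]
            exact Or.inl (by omega)
          · simp [he]
      · simp [prCheck, hs]

-- the per-read decision is identical in A and B
theorem prRead_eq (c : String) (rs re : Int) (seeds : List (String × Int × Int)) :
    prInSeed c rs re seeds
      = prCheck re (prBest rs none
          ((seeds.foldl (fun d p => d.modify p.1 [] (· ++ [p.2])) PySem.Dict.empty).getD c [])) := by
  rw [prBest_check, PySem.Dict.getD_foldl_modify_append, prInSeed_eq_any]
  simp only [PySem.Dict.getD_empty, List.nil_append, prCheck, Bool.false_or, List.any_map,
    List.any_filter]
  congr 1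
  funext p
  rcases p with ⟨sc, ss, se⟩
  by_cases h : sc == c <;> simp [h, Function.comp]

-- ===== VERDICT (by name: the statement is the Claim_ definition above) =====
theorem place_reads_spec : Claim_equal_place_reads := by
  intro mr ps _
  unfold Spec_place_reads place_reads place_reads_alt
  apply PySem.List.foldl_congr_mem
  intro acc r _
  rw [prRead_eq r.2.2.1 r.2.2.2.1 r.2.2.2.2 ps]
  rcases hb : prBest r.2.2.2.1 none
      ((ps.foldl (fun d p => d.modify p.1 [] (· ++ [p.2])) PySem.Dict.empty).getD r.2.2.1 []) with _ | b
  · rw [hb]; simp [prCheck]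
  · rw [hb]
    by_cases he : r.2.2.2.2 < b <;> simp [prCheck, he]
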